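-- pv_equiv track=rewrite | github.com/Jiangxy02/metadrive | a_scen_env/cognitive_visualization.py | _get_active_regions
-- ===== SOURCE A (Python) =====
-- def _get_active_regions(active_flags):
--     """获取激活区间"""
--     regions = []
--     start = None
--
--     for i, active in enumerate(active_flags):
--         if active and start is None:
--             start = i
--         elif not active and start is not None:
--             regions.append((start, i-1))
--             start = None
--
--     # 处理最后一个区间
--     if start is not None:
--         regions.append((start, len(active_flags)-1))
--
--     return regions
-- ===== SOURCE B (Python) =====
-- def _get_active_regions(active_flags):
--     """Run-splitting: advance over maximal runs of equal truthiness, emit the active runs."""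
--     regions = []
--     pos = 0
--     n = len(active_flags)
--     while pos < n:
--         cur = bool(active_flags[pos])
--         end = pos + 1
--         while end < n and bool(active_flags[end]) == cur:
--             end += 1
--         if cur:
--             regions.append((pos, end - 1))
--         pos = end
--     return regions
-- ===== Notes on version B (the rewrite author's own statement) =====
-- stated objective: alternative
-- what changed: B splits the list into maximal runs of equal truthiness (an outer loop advancing run by run with an inner run-length scan) and emits the active runs directly, instead of A's single boundary-detecting pass that threads a pending-start sentinel and flushes it at the end.
import Mathlib
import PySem

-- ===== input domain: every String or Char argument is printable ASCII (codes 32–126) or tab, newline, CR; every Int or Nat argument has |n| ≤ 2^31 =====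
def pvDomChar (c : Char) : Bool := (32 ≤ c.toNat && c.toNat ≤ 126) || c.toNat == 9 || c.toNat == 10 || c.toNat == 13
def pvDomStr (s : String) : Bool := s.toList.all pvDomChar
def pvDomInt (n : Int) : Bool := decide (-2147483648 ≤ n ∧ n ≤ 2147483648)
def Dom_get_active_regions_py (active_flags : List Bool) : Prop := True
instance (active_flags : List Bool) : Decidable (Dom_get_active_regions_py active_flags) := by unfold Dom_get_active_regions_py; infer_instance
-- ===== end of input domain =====

-- B replaces A's pending-start boundary pass by a run-splitting loop over maximal runs of equal flags (alternative decomposition, same O(n) cost).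

-- ===== PORT A =====
-- one step of A's `for i, active in enumerate(active_flags)` loop; state = (regions, start)
def pvAStep (st : List (Int × Int) × Option Int) (p : Int × Bool) : List (Int × Int) × Option Int :=
  let (regions, start) := st
  let (i, active) := p
  if active && start.isNone then (regions, some i)
  else if !active && start.isSome then (regions ++ [(start.get!, i - 1)], none)
  else (regions, start)

def pvEnumFrom (i : Int) : List Bool → List (Int × Bool)
  | [] => []
  | x :: xs => (i, x) :: pvEnumFrom (i + 1) xs

def get_active_regions_py (active_flags : List Bool) : List (Int × Int) :=
  let st := (pvEnumFrom 0 active_flags).foldl pvAStep ([], none)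
  match st with
  | (regions, some s) => regions ++ [(s, (active_flags.length : Int) - 1)]
  | (regions, none) => regions

-- ===== PORT B =====
-- B's outer while loop, one step per maximal run (inner run scan = takeWhile/dropWhile);
-- fuel = list length is only a totality guard, never exhausted on the actual call
def pvRunsAux : Nat → List Bool → Int → List (Int × Int)
  | _, [], _ => []
  | 0, _ :: _, _ => []
  | fuel + 1, x :: rest, pos =>
    let t : Int := ((rest.takeWhile (· == x)).length : Int)
    (if x then [(pos, pos + (1 + t) - 1)] else []) ++
      pvRunsAux fuel (rest.dropWhile (· == x)) (pos + (1 + t))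

def get_active_regions_py_alt (active_flags : List Bool) : List (Int × Int) :=
  pvRunsAux active_flags.length active_flags 0

-- ===== SPEC =====
def Spec_get_active_regions_py (active_flags : List Bool) (out : List (Int × Int)) : Prop := out = get_active_regions_py_alt active_flags
instance (active_flags : List Bool) (out : List (Int × Int)) : Decidable (Spec_get_active_regions_py active_flags out) := by unfold Spec_get_active_regions_py; infer_instance

def Claim_equal_get_active_regions_py : Prop := ∀ (active_flags : List Bool), Dom_get_active_regions_py active_flags → Spec_get_active_regions_py active_flags (get_active_regions_py active_flags)

-- ===== LEMMAS AND PROOFS =====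
def pvRunsN (xs : List Bool) (pos : Int) : List (Int × Int) := pvRunsAux xs.length xs pos

def pvFinalize (st : List (Int × Int) × Option Int) (n : Int) : List (Int × Int) :=
  match st with
  | (r, some s) => r ++ [(s, n - 1)]
  | (r, none) => r

def pvConsume (s : Int) : List Bool → Int → List (Int × Int)
  | [], j => [(s, j - 1)]
  | true :: xs, j => pvConsume s xs (j + 1)
  | false :: xs, j => (s, j - 1) :: pvRunsN xs (j + 1)

theorem pvAux_irrel : ∀ (f : Nat) (xs : List Bool), xs.length ≤ f → ∀ pos, pvRunsAux f xs pos = pvRunsN xs pos := by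
  intro f
  induction f using Nat.strong_induction_on with
  | _ f ih =>
    intro xs h pos
    match f, xs with
    | _, [] => cases f <;> simp [pvRunsN, pvRunsAux]
    | 0, x :: rest => simp at h
    | n + 1, x :: rest =>
      have h1 : rest.length ≤ n := by simpa using h
      have hd : (rest.dropWhile (· == x)).length ≤ rest.length :=
        List.length_dropWhile_le (· == x) rest
      show _ ++ pvRunsAux n _ _ = pvRunsAux (rest.length + 1) (x :: rest) pos
      rw [pvRunsAux]
      have e1 := ih n (Nat.lt_succ_self n) (rest.dropWhile (· == x)) (hd.trans h1)
      have e2 := ih rest.length (Nat.lt_succ_of_le h1) (rest.dropWhile (· == x)) hd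
      rw [e1, e2]

theorem pvRunsN_cons (x : Bool) (rest : List Bool) (pos : Int) :
    pvRunsN (x :: rest) pos =
      (if x then [(pos, pos + (1 + ((rest.takeWhile (· == x)).length : Int)) - 1)] else []) ++
        pvRunsN (rest.dropWhile (· == x)) (pos + (1 + ((rest.takeWhile (· == x)).length : Int))) := by
  show pvRunsAux (rest.length + 1) (x :: rest) pos = _
  rw [pvRunsAux]
  rw [pvAux_irrel rest.length (rest.dropWhile (· == x)) (List.length_dropWhile_le (· == x) rest)]

theorem pvRuns_false (xs : List Bool) (i : Int) :
    pvRunsN (false :: xs) i = pvRunsN xs (i + 1) := by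
  cases xs with
  | nil => rw [pvRunsN_cons]; simp
  | cons b ys =>
    cases b with
    | false =>
      rw [pvRunsN_cons, pvRunsN_cons]
      simp only [List.takeWhile, List.dropWhile]
      norm_num
      congr 1
      ring
    | true =>
      rw [pvRunsN_cons]
      simp [List.takeWhile, List.dropWhile]

theorem pvConsume_eq (xs : List Bool) (s j : Int) :
    pvConsume s xs j =
      (s, j + ((xs.takeWhile (· == true)).length : Int) - 1) ::
        pvRunsN (xs.dropWhile (· == true)) (j + ((xs.takeWhile (· == true)).length : Int)) := by
  induction xs generalizing j with
  | nil => simp [pvConsume, pvRunsN, pvRunsAux]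
  | cons b ys ih =>
    cases b with
    | true =>
      rw [pvConsume, ih (j + 1)]
      simp only [List.takeWhile, List.dropWhile]
      norm_num
      constructor
      · ring
      · congr 1; ring
    | false =>
      rw [pvConsume]
      simp [List.takeWhile, List.dropWhile, pvRuns_false]

theorem pvRuns_true (xs : List Bool) (i : Int) :
    pvRunsN (true :: xs) i = pvConsume i xs (i + 1) := by
  rw [pvRunsN_cons, pvConsume_eq]
  norm_num
  constructor
  · ring
  · congr 1; ring

theorem pvLoop (xs : List Bool) : ∀ (i : Int) (r : List (Int × Int)),
    (pvFinalize ((pvEnumFrom i xs).foldl pvAStep (r, none)) (i + (xs.length : Int)) = r ++ pvRunsN xs i)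
    ∧ ∀ s, pvFinalize ((pvEnumFrom i xs).foldl pvAStep (r, some s)) (i + (xs.length : Int)) = r ++ pvConsume s xs i := by
  induction xs with
  | nil =>
    intro i r
    constructor
    · simp [pvEnumFrom, pvFinalize, pvRunsN, pvRunsAux]
    · intro s; simp [pvEnumFrom, pvFinalize, pvConsume]
  | cons b ys ih =>
    intro i r
    have hn : i + (((b :: ys).length : Nat) : Int) = (i + 1) + (ys.length : Int) := by
      simp only [List.length_cons]; push_cast; ring
    cases b with
    | true =>
      constructor
      · rw [pvRuns_true]
        have h := (ih (i + 1) r).2 i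
        simp only [pvEnumFrom, List.foldl, pvAStep, Option.isNone, Bool.and_true, hn]
        simpa using h
      · intro s
        have h := (ih (i + 1) r).2 s
        simp only [pvEnumFrom, List.foldl, pvAStep, Option.isNone, Option.isSome, hn, pvConsume]
        simpa using h
    | false =>
      constructor
      · rw [pvRuns_false]
        have h := (ih (i + 1) r).1
        simp only [pvEnumFrom, List.foldl, pvAStep, Option.isNone, Option.isSome, hn]
        simpa using h
      · intro s
        have h := (ih (i + 1) (r ++ [(s, i - 1)])).1
        simp only [pvEnumFrom, List.foldl, pvAStep, Option.isNone, Option.isSome, Option.get!, hn, pvConsume]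
        simpa using h

-- ===== VERDICT =====
theorem get_active_regions_py_spec : Claim_equal_get_active_regions_py := by
  intro xs _
  unfold Spec_get_active_regions_py get_active_regions_py get_active_regions_py_alt
  have h := (pvLoop xs 0 []).1
  simpa [pvFinalize, pvRunsN] using h
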